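-- pv_equiv track=rewrite | github.com/ZeqiangWangAI/elsst-benchmark-baselines | src/elsst_baselines/common/lora.py | discover_lora_target_modules
-- ===== SOURCE A (Python) =====
-- from typing import Iterable
--
-- PREFERRED_SUFFIXES = (
--     "q_proj",
--     "k_proj",
--     "v_proj",
--     "o_proj",
--     "up_proj",
--     "down_proj",
--     "gate_proj",
-- )
--
-- EXCLUDED_PATTERNS = ("embed", "lm_head", "output", "score", "vision", "visual")
--
-- def _iter_module_names(model_or_module_names):
--     if isinstance(model_or_module_names, Iterable) and not hasattr(model_or_module_names, "named_modules"):
--         for item in model_or_module_names: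
--             if isinstance(item, str):
--                 yield item
--         return
--
--     for name, module in model_or_module_names.named_modules():
--         if not name:
--             continue
--         class_name = module.__class__.__name__.lower()
--         if "linear" not in class_name and not hasattr(module, "weight"):
--             continue
--         yield name
--
-- def _is_excluded(name):
--     lowered = name.lower()
--     return any(pattern in lowered for pattern in EXCLUDED_PATTERNS)
--
-- def discover_lora_target_modules(model_or_module_names):
--     names = list(_iter_module_names(model_or_module_names))
--     preferred = sorted({name.rsplit(".", 1)[-1] for name in names if name.endswith(PREFERRED_SUFFIXES) and not _is_excluded(name)})
--     if preferred:
--         return preferred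
--
--     fallback = sorted(
--         {
--             name.rsplit(".", 1)[-1]
--             for name in names
--             if not _is_excluded(name)
--         }
--     )
--     if not fallback:
--         raise ValueError("could not discover LoRA target modules")
--     return fallback
-- ===== SOURCE B (Python) =====
-- from typing import Iterable
--
-- PREFERRED_SUFFIXES = (
--     "q_proj",
--     "k_proj",
--     "v_proj",
--     "o_proj",
--     "up_proj",
--     "down_proj",
--     "gate_proj",
-- )
--
-- EXCLUDED_PATTERNS = ("embed", "lm_head", "output", "score", "vision", "visual")
--
-- def _iter_module_names(model_or_module_names):
--     if isinstance(model_or_module_names, Iterable) and not hasattr(model_or_module_names, "named_modules"):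
--         for item in model_or_module_names:
--             if isinstance(item, str):
--                 yield item
--         return
--
--     for name, module in model_or_module_names.named_modules():
--         if not name:
--             continue
--         class_name = module.__class__.__name__.lower()
--         if "linear" not in class_name and not hasattr(module, "weight"):
--             continue
--         yield name
--
-- def _is_excluded(name):
--     lowered = name.lower()
--     return any(pattern in lowered for pattern in EXCLUDED_PATTERNS)
--
-- def discover_lora_target_modules(model_or_module_names):
--     # Single pass: maintain the fallback and preferred suffix sets together.
--     fallback = set()
--     preferred = set()
--     for name in _iter_module_names(model_or_module_names):
--         if _is_excluded(name):
--             continue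
--         suffix = name.rsplit(".", 1)[-1]
--         fallback.add(suffix)
--         if name.endswith(PREFERRED_SUFFIXES):
--             preferred.add(suffix)
--     if preferred:
--         return sorted(preferred)
--     if not fallback:
--         raise ValueError("could not discover LoRA target modules")
--     return sorted(fallback)
-- ===== Notes on version B (the rewrite author's own statement) =====
-- stated objective: alternative
-- what changed: A builds the preferred set in one comprehension and, only if it is empty, re-scans all names in a second comprehension for the fallback set; B makes a single pass over the names maintaining both suffix sets simultaneously and picks the preferred set if non-empty.
import Mathlib
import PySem

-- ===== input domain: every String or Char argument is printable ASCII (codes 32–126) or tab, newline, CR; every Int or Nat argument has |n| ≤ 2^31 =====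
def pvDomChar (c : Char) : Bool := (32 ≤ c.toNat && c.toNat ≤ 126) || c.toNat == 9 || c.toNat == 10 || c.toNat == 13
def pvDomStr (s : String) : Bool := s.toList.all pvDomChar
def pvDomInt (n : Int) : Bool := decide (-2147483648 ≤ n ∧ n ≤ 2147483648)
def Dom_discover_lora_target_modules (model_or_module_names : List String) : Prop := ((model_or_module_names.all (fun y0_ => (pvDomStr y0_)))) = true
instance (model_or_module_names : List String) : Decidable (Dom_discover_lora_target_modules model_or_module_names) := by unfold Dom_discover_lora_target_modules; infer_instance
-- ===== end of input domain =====

-- B replaces A's two separate set comprehensions (second one only computed when the first is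
-- empty) with a single pass that maintains the fallback and preferred suffix sets together.


-- ===== PORT A =====
def pvPreferredSuffixes : List String :=
  ["q_proj", "k_proj", "v_proj", "o_proj", "up_proj", "down_proj", "gate_proj"]

def pvExcludedPatterns : List String :=
  ["embed", "lm_head", "output", "score", "vision", "visual"]

-- _is_excluded: any excluded pattern occurs in name.lower()
def pvIsExcluded (name : String) : Bool :=
  pvExcludedPatterns.any (fun p => PySem.Str.isIn p (PySem.Str.lower name))

-- name.endswith(PREFERRED_SUFFIXES): endswith of a tuple = any of the suffixes
def pvEndsPreferred (name : String) : Bool :=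
  pvPreferredSuffixes.any (fun s => PySem.Str.endswith name s)

-- name.rsplit(".", 1)[-1] — hand port, exact: the part after the LAST '.', the whole
-- string when no '.' occurs (chars after the last '.' = reversed take-until-'.' of the reverse)
def pvLastSeg (name : String) : String :=
  String.ofList ((name.toList.reverse.takeWhile (fun c => c ≠ '.')).reverse)

-- _iter_module_names on a list of strings yields exactly the list itself (every item is a str),
-- so `names = list(_iter_module_names(...))` is the argument list.
-- The final `raise ValueError` branch (fallback empty) is excluded by Pre_; the port
-- returns the (empty) sorted fallback there.
def discover_lora_target_modules (model_or_module_names : List String) : List String :=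
  let names := model_or_module_names
  let preferred := PySem.List.sorted
    (PySem.Set.ofList ((names.filter (fun name => pvEndsPreferred name && !pvIsExcluded name)).map pvLastSeg))
    (fun x => x) false
  if preferred ≠ [] then preferred
  else
    PySem.List.sorted
      (PySem.Set.ofList ((names.filter (fun name => !pvIsExcluded name)).map pvLastSeg))
      (fun x => x) false

-- ===== PORT B =====
-- single pass maintaining both sets; the `raise` branch (fallback empty) is excluded by Pre_
def discover_lora_target_modules_alt (model_or_module_names : List String) : List String :=
  let acc := model_or_module_names.foldl
    (fun (acc : PySem.Set String × PySem.Set String) name =>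
      if pvIsExcluded name then acc
      else
        let suffix := pvLastSeg name
        (PySem.Set.add acc.1 suffix,
         if pvEndsPreferred name then PySem.Set.add acc.2 suffix else acc.2))
    (PySem.Set.empty, PySem.Set.empty)
  if acc.2 ≠ [] then PySem.List.sorted acc.2 (fun x => x) false
  else PySem.List.sorted acc.1 (fun x => x) false

-- ===== PRECONDITION & SPEC =====
-- Pre_ excludes exactly the inputs with no non-excluded name, where Python A (and B) raises ValueError.
def Pre_discover_lora_target_modules (model_or_module_names : List String) : Prop :=
  model_or_module_names.any (fun name => !pvIsExcluded name) = true
instance (model_or_module_names : List String) : Decidable (Pre_discover_lora_target_modules model_or_module_names) := by unfold Pre_discover_lora_target_modules; infer_instance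

def pvWitness_discover_lora_target_modules : List String := ["layers.0.q_proj"]

def Spec_discover_lora_target_modules (model_or_module_names : List String) (out : List String) : Prop := out = discover_lora_target_modules_alt model_or_module_names
instance (model_or_module_names : List String) (out : List String) : Decidable (Spec_discover_lora_target_modules model_or_module_names out) := by unfold Spec_discover_lora_target_modules; infer_instance

-- ===== CLAIM (what is proved, stated in full; the proofs are below) =====
def Claim_equal_discover_lora_target_modules : Prop := ∀ (model_or_module_names : List String), Dom_discover_lora_target_modules model_or_module_names → Pre_discover_lora_target_modules model_or_module_names → Spec_discover_lora_target_modules model_or_module_names (discover_lora_target_modules model_or_module_names)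

-- ===== LEMMAS AND PROOFS =====

-- B's single fold is the pair of the two folds over A's filtered-and-mapped lists.
lemma alt_foldl_eq (names : List String) (f p : PySem.Set String) :
    names.foldl
      (fun (acc : PySem.Set String × PySem.Set String) name =>
        if pvIsExcluded name then acc
        else
          let suffix := pvLastSeg name
          (PySem.Set.add acc.1 suffix,
           if pvEndsPreferred name then PySem.Set.add acc.2 suffix else acc.2))
      (f, p)
    = (((names.filter (fun name => !pvIsExcluded name)).map pvLastSeg).foldl PySem.Set.add f,
       ((names.filter (fun name => pvEndsPreferred name && !pvIsExcluded name)).map pvLastSeg).foldl PySem.Set.add p) := by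
  induction names generalizing f p with
  | nil => rfl
  | cons n t ih =>
    by_cases hx : pvIsExcluded n
    · simp [List.foldl_cons, hx, ih]
    · by_cases hp : pvEndsPreferred n <;>
        simp [List.foldl_cons, hx, hp, ih]

theorem discover_lora_target_modules_spec_aux (names : List String) :
    discover_lora_target_modules names = discover_lora_target_modules_alt names := by
  unfold discover_lora_target_modules discover_lora_target_modules_alt
  rw [alt_foldl_eq]
  simp only [PySem.Set.ofList_eq_foldl, PySem.Set.empty]
  by_cases h : (((names.filter (fun name => pvEndsPreferred name && !pvIsExcluded name)).map pvLastSeg).foldl PySem.Set.add []) = []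
  · simp [h, PySem.List.sorted_eq_nil_iff]
  · simp [h, PySem.List.sorted_eq_nil_iff]

-- ===== VERDICT (by name: the statement is the Claim_ definition above) =====
theorem discover_lora_target_modules_spec : Claim_equal_discover_lora_target_modules := by
  intro names _ _
  exact discover_lora_target_modules_spec_aux names
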